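-- pv_equiv track=rewrite | github.com/Entropyobserver/test | 5LN429/exercises4/4_exercise_3_3p.py | cal_adjacency
-- ===== SOURCE A (Python) =====
-- def cal_adjacency(word):
--     adjacency = 0
--     vowels = 'aeiou'
--     for i in range(len(word) - 1):
--         if (word[i] in vowels and word[i+1] in vowels) or \
--            (word[i] not in vowels and word[i+1] not in vowels):
--             adjacency += 1
--     return adjacency
-- ===== SOURCE B (Python) =====
-- def cal_adjacency(word):
--     # len(word) minus the number of maximal same-category runs
--     flags = [c in 'aeiou' for c in word]
--     runs = 0
--     prev = None
--     for f in flags: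
--         if f != prev:
--             runs += 1
--         prev = f
--     return len(word) - runs
-- ===== Notes on version B (the rewrite author's own statement) =====
-- stated objective: alternative
-- what changed: B maps each character to a vowel/consonant flag once and counts maximal same-category runs in a single pass, returning len(word) - runs, instead of A's index loop that tests both word[i] and word[i+1] against the vowel string for every pair.
import Mathlib
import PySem

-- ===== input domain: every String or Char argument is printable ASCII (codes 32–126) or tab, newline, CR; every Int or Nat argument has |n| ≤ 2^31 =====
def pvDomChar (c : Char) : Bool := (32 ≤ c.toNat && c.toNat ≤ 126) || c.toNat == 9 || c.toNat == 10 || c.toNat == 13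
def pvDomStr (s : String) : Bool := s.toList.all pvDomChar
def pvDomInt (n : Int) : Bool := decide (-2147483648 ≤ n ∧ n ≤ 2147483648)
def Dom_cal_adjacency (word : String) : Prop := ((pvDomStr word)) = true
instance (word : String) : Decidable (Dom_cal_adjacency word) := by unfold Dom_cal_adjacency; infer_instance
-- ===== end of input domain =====

-- B counts maximal vowel/consonant runs in one pass and returns len(word) - runs,
-- replacing A's index loop over adjacent pairs (alternative decomposition, same cost).


-- ===== PORT A =====
-- word[i] in 'aeiou' : word[i] is a single character, so membership is char membership
def isVowel (c : Char) : Bool := "aeiou".toList.contains c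

def cal_adjacency (word : String) : Int :=
  let l := word.toList
  (PySem.List.pyRange 0 ((l.length : Int) - 1) 1).foldl
    (fun adjacency i =>
      if (isVowel (PySem.List.pyGetD l i ' ') && isVowel (PySem.List.pyGetD l (i + 1) ' '))
         || (!isVowel (PySem.List.pyGetD l i ' ') && !isVowel (PySem.List.pyGetD l (i + 1) ' '))
      then adjacency + 1 else adjacency) 0

-- ===== PORT B =====
def cal_adjacency_alt (word : String) : Int :=
  let flags := word.toList.map isVowel
  let runs := (flags.foldl
      (fun s f => (if s.2 = some f then s.1 else s.1 + 1, some f))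
      ((0 : Int), (none : Option Bool))).1
  (word.toList.length : Int) - runs

-- ===== PRECONDITION & SPEC =====
def Spec_cal_adjacency (word : String) (out : Int) : Prop := out = cal_adjacency_alt word
instance (word : String) (out : Int) : Decidable (Spec_cal_adjacency word out) := by unfold Spec_cal_adjacency; infer_instance

-- ===== CLAIM (what is proved, stated in full; the proofs are below) =====
def Claim_equal_cal_adjacency : Prop := ∀ (word : String), Dom_cal_adjacency word → Spec_cal_adjacency word (cal_adjacency word)

-- ===== LEMMAS AND PROOFS =====

-- A's branch condition is equality of the two category flags
theorem cond_eq_beq (a b : Char) :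
    ((isVowel a && isVowel b) || (!isVowel a && !isVowel b)) = (isVowel a == isVowel b) := by
  cases h1 : isVowel a <;> cases h2 : isVowel b <;> simp

-- index-pair count over range(len-1) equals the count over zip(l, l.tail)
theorem countP_range_pairs (q : Char → Char → Bool) (l : List Char) :
    (List.range (l.length - 1)).countP
        (fun k => q (l.getD k ' ') (l.getD (k + 1) ' '))
      = (l.zip l.tail).countP (fun ab => q ab.1 ab.2) := by
  induction l with
  | nil => simp
  | cons a t ih =>
    cases t with
    | nil => simp
    | cons b t' =>
      have hlen : (a :: b :: t').length - 1 = t'.length + 1 := by simp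
      rw [hlen, List.range_succ_eq_map]
      simp only [List.countP_cons, List.countP_map]
      have hzip : ((a :: b :: t').zip (a :: b :: t').tail)
          = (a, b) :: ((b :: t').zip (b :: t').tail) := by simp
      rw [hzip, List.countP_cons]
      have hmain : (List.range t'.length).countP
          ((fun k => q ((a :: b :: t').getD k ' ') ((a :: b :: t').getD (k + 1) ' ')) ∘ Nat.succ)
          = ((b :: t').zip (b :: t').tail).countP (fun ab => q ab.1 ab.2) := by
        rw [← ih]
        apply List.countP_congr
        intro k _
        simp [Function.comp, List.getD]
      rw [hmain]
      simp [List.getD]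

-- the run-counting fold, once started: remaining increments with a known previous flag
def chg (p : Bool) : List Bool → Int
  | [] => 0
  | f :: t => (if p = f then 0 else 1) + chg f t

theorem foldl_runs_some (t : List Bool) (p : Bool) (r : Int) :
    (t.foldl (fun s f => (if s.2 = some f then s.1 else s.1 + 1, some f)) (r, some p)).1
      = r + chg p t := by
  induction t generalizing p r with
  | nil => simp [chg]
  | cons f t ih =>
    by_cases h : p = f
    · simp [chg, h, ih]
    · simp only [chg, List.foldl_cons, h, if_neg (by simp [h] : ¬ ((some p : Option Bool) = some f)), ih]
      simp
      ring

-- length = runs + number of adjacent equal-flag pairs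
theorem len_eq_runs_add_pairs (fs : List Bool) :
    (fs.length : Int)
      = (fs.foldl (fun s f => (if s.2 = some f then s.1 else s.1 + 1, some f))
          ((0 : Int), (none : Option Bool))).1
        + ((fs.zip fs.tail).countP (fun ab => ab.1 == ab.2) : Int) := by
  cases fs with
  | nil => simp
  | cons f t =>
    have h0 : ((f :: t).foldl (fun s f => (if s.2 = some f then s.1 else s.1 + 1, some f))
        ((0 : Int), (none : Option Bool))).1 = 1 + chg f t := by
      rw [List.foldl_cons]
      have : ((if (some (none : Option Bool)).get rfl = some f then (0:Int) else 0 + 1), some f) = ((1:Int), some f) := by simp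
      simp [foldl_runs_some]
    rw [h0]
    have key : ∀ (t : List Bool) (f : Bool),
        ((f :: t).length : Int)
          = (1 + chg f t) + (((f :: t).zip t).countP (fun ab => ab.1 == ab.2) : Int) := by
      intro t
      induction t with
      | nil => simp [chg]
      | cons g t' ih =>
        intro f
        have hz : ((f :: g :: t').zip (g :: t')) = (f, g) :: ((g :: t').zip t') := by simp
        rw [hz, List.countP_cons]
        have := ih g
        by_cases h : f = g <;> simp [chg, h] at this ⊢ <;> omega
    simpa using key t f

theorem cal_adjacency_eq (word : String) : cal_adjacency word = cal_adjacency_alt word := by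
  unfold cal_adjacency cal_adjacency_alt
  dsimp only
  set l := word.toList with hl
  rw [PySem.List.foldl_if_add_one, PySem.List.pyRange_one, List.countP_map, zero_add]
  have hcast : ((l.length : Int) - 1 - 0).toNat = l.length - 1 := by omega
  rw [hcast]
  have hc : (List.range (l.length - 1)).countP
      ((fun i => (isVowel (PySem.List.pyGetD l i ' ') && isVowel (PySem.List.pyGetD l (i + 1) ' '))
         || (!isVowel (PySem.List.pyGetD l i ' ') && !isVowel (PySem.List.pyGetD l (i + 1) ' ')))
        ∘ (fun k : Nat => (0 : Int) + (k : Int)))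
      = (List.range (l.length - 1)).countP
        (fun k => (isVowel (l.getD k ' ') == isVowel (l.getD (k + 1) ' '))) := by
    apply List.countP_congr
    intro k _
    have h1 : (0 : Int) + (k : Int) = ((k : Nat) : Int) := by omega
    have h2 : (k : Int) + 1 = (((k + 1 : Nat)) : Int) := by push_cast; ring
    simp only [Function.comp, h1, h2, PySem.List.pyGetD_natCast, cond_eq_beq]
  rw [hc, countP_range_pairs (fun a b => isVowel a == isVowel b) l]
  have hzipmap : ((l.map isVowel).zip (l.map isVowel).tail).countP (fun ab => ab.1 == ab.2)
      = (l.zip l.tail).countP (fun ab => isVowel ab.1 == isVowel ab.2) := by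
    rw [← List.map_tail, List.zip_map, List.countP_map]
    rfl
  have hlen := len_eq_runs_add_pairs (l.map isVowel)
  rw [hzipmap] at hlen
  simp only [List.length_map] at hlen
  omega

-- ===== VERDICT (by name: the statement is the Claim_ definition above) =====
theorem cal_adjacency_spec : Claim_equal_cal_adjacency := by
  intro word _
  unfold Spec_cal_adjacency
  exact cal_adjacency_eq word
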